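-- pv_equiv track=rewrite | github.com/mkohei/google-jamboard | edit_for_usm.py | add_priority_each_narrative_flow
-- ===== SOURCE A (Python) =====
-- def add_priority_each_narrative_flow(pbis_with_narrative_flows):
--     pre_narrative_flow_index = '-1'
--
--     priority = 1
--     for k,pbi in enumerate(pbis_with_narrative_flows):
--         if pre_narrative_flow_index != pbi['narrative_flow_index']:
--             priority = 1
--             pre_narrative_flow_index = pbi['narrative_flow_index']
--
--         pbis_with_narrative_flows[k]['priority_each_narrative_flow'] = priority
--         priority += 1
--     return pbis_with_narrative_flows
-- ===== SOURCE B (Python) =====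
-- def add_priority_each_narrative_flow(pbis_with_narrative_flows):
--     # Phase 1: split the list into consecutive runs of equal narrative_flow_index.
--     runs = []
--     cur_key = None
--     cur_run = None
--     for pbi in pbis_with_narrative_flows:
--         key = pbi['narrative_flow_index']
--         if cur_run is not None and cur_key == key:
--             cur_run.append(pbi)
--         else:
--             if cur_run is not None:
--                 runs.append(cur_run)
--             cur_key, cur_run = key, [pbi]
--     if cur_run is not None:
--         runs.append(cur_run)
--     # Phase 2: number each run from 1 (mutates the shared dicts in place).
--     for run in runs:
--         for i, pbi in enumerate(run, 1):
--             pbi['priority_each_narrative_flow'] = i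
--     return pbis_with_narrative_flows
-- ===== Notes on version B (the rewrite author's own statement) =====
-- stated objective: alternative
-- what changed: Replaces A's single stateful pass with previous-index/priority counters by a two-phase group-then-number decomposition: first split the list into consecutive runs of equal narrative_flow_index, then enumerate each run from 1.
import Mathlib
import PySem

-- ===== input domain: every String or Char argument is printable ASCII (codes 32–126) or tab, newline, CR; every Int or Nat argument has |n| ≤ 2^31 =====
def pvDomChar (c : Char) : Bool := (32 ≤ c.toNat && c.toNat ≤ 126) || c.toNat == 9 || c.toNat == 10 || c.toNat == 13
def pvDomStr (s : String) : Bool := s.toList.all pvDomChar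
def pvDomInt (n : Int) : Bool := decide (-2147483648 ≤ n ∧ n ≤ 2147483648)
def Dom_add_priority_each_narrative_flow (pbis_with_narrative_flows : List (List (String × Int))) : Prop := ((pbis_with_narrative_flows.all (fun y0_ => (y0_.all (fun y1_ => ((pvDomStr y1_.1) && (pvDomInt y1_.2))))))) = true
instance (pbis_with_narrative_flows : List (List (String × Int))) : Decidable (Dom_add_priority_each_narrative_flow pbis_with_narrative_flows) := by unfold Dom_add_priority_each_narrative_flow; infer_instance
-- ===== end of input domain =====

-- B replaces A's single stateful pass (previous-index / priority counters) by a two-phase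
-- group-then-number decomposition; same cost. Both mutate the shared dicts in place in Python;
-- the equivalence proved here is about the returned value (which is the mutated list in both).


-- ===== PORT A =====
-- dict lookup / dict assignment on the association-list encoding (exact Python dict semantics via PySem.Dict)
def pvGetKey (d : List (String × Int)) (k : String) : Option Int := (PySem.Dict.mk d).get? k
def pvPut (d : List (String × Int)) (k : String) (v : Int) : List (String × Int) := ((PySem.Dict.mk d).insert k v).items

-- A's loop: state = (pre_narrative_flow_index, priority). The initial sentinel '-1' is a STRING and
-- the compared values are ints, so it never equals any of them: modelled exactly by `none : Option Int`.
def goA (pre : Option Int) (priority : Int) : List (List (String × Int)) → List (List (String × Int))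
  | [] => []
  | d :: rest =>
    match pvGetKey d "narrative_flow_index" with
    | none => d :: rest   -- Python raises KeyError here; excluded by Pre_
    | some v =>
      if pre ≠ some v then
        pvPut d "priority_each_narrative_flow" 1 :: goA (some v) 2 rest
      else
        pvPut d "priority_each_narrative_flow" priority :: goA pre (priority + 1) rest

def add_priority_each_narrative_flow (pbis_with_narrative_flows : List (List (String × Int))) : List (List (String × Int)) :=
  goA none 1 pbis_with_narrative_flows

-- ===== PORT B =====
-- Phase 1 of Source B: split into consecutive runs of equal narrative_flow_index
-- (state = runs accumulated so far handled by the recursion, cur = (cur_key, cur_run) or None).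
def splitRuns (cur : Option (Option Int × List (List (String × Int)))) :
    List (List (String × Int)) → List (List (List (String × Int)))
  | [] => match cur with
    | none => []
    | some (_, g) => [g]
  | d :: rest =>
    let key := pvGetKey d "narrative_flow_index"
    match cur with
    | some (ck, g) =>
      if ck = key then splitRuns (some (ck, g ++ [d])) rest
      else g :: splitRuns (some (key, [d])) rest
    | none => splitRuns (some (key, [d])) rest

-- Phase 2 of Source B: enumerate(run, 1) with in-place assignment
def numFrom (i : Int) : List (List (String × Int)) → List (List (String × Int))
  | [] => []
  | d :: rest => pvPut d "priority_each_narrative_flow" i :: numFrom (i + 1) rest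

-- Source B returns the input list whose dicts were mutated; since the runs partition it in order,
-- that returned value is exactly the concatenation of the numbered runs.
def add_priority_each_narrative_flow_alt (pbis_with_narrative_flows : List (List (String × Int))) : List (List (String × Int)) :=
  (splitRuns none pbis_with_narrative_flows).flatMap (numFrom 1)

-- ===== PRECONDITION & SPEC =====
-- Pre_ excludes exactly the inputs on which A raises KeyError: a dict without 'narrative_flow_index'.
def Pre_add_priority_each_narrative_flow (pbis_with_narrative_flows : List (List (String × Int))) : Prop :=
  ∀ d ∈ pbis_with_narrative_flows, ((PySem.Dict.mk d).get? "narrative_flow_index").isSome = true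
instance (pbis_with_narrative_flows : List (List (String × Int))) : Decidable (Pre_add_priority_each_narrative_flow pbis_with_narrative_flows) := by unfold Pre_add_priority_each_narrative_flow; infer_instance

def pvWitness_add_priority_each_narrative_flow : (List (List (String × Int))) :=
  [[("narrative_flow_index", 0)], [("narrative_flow_index", 0)], [("narrative_flow_index", 1)]]

def Spec_add_priority_each_narrative_flow (pbis_with_narrative_flows : List (List (String × Int))) (out : List (List (String × Int))) : Prop := out = add_priority_each_narrative_flow_alt pbis_with_narrative_flows
instance (pbis_with_narrative_flows : List (List (String × Int))) (out : List (List (String × Int))) : Decidable (Spec_add_priority_each_narrative_flow pbis_with_narrative_flows out) := by unfold Spec_add_priority_each_narrative_flow; infer_instance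

-- ===== CLAIM (what is proved, stated in full; the proofs are below) =====
def Claim_equal_add_priority_each_narrative_flow : Prop := ∀ (pbis_with_narrative_flows : List (List (String × Int))), Dom_add_priority_each_narrative_flow pbis_with_narrative_flows → Pre_add_priority_each_narrative_flow pbis_with_narrative_flows → Spec_add_priority_each_narrative_flow pbis_with_narrative_flows (add_priority_each_narrative_flow pbis_with_narrative_flows)

-- ===== LEMMAS AND PROOFS =====

theorem numFrom_append (a b : List (List (String × Int))) (i : Int) :
    numFrom i (a ++ b) = numFrom i a ++ numFrom (i + a.length) b := by
  induction a generalizing i with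
  | nil => simp [numFrom]
  | cons d rest ih =>
    simp only [List.cons_append, numFrom, ih, List.length_cons]
    rw [show (i + 1 + (rest.length : Int)) = i + ((rest.length + 1 : Nat) : Int) from by push_cast; ring]

-- main invariant: a pending run (k, g) in B corresponds to A continuing with pre = k, priority = |g| + 1
theorem main_inv (rest : List (List (String × Int))) (k : Option Int) (g : List (List (String × Int)))
    (hpre : ∀ d ∈ rest, ((PySem.Dict.mk d).get? "narrative_flow_index").isSome = true) :
    (splitRuns (some (k, g)) rest).flatMap (numFrom 1)
      = numFrom 1 g ++ goA k ((g.length : Int) + 1) rest := by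
  induction rest generalizing k g with
  | nil => simp [splitRuns, goA]
  | cons d rest ih =>
    have hd : ((PySem.Dict.mk d).get? "narrative_flow_index").isSome = true :=
      hpre d (List.mem_cons_self ..)
    have hrest : ∀ d ∈ rest, ((PySem.Dict.mk d).get? "narrative_flow_index").isSome = true :=
      fun d hm => hpre d (List.mem_cons_of_mem _ hm)
    obtain ⟨v, hv⟩ := Option.isSome_iff_exists.mp hd
    simp only [splitRuns, goA, pvGetKey, hv]
    by_cases hk : k = some v
    · subst hk
      rw [if_pos rfl, if_neg (fun h => h rfl), ih _ _ hrest, numFrom_append, List.append_assoc]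
      simp only [numFrom, List.cons_append, List.nil_append, List.length_append,
        List.length_cons, List.length_nil, Nat.zero_add]
      rw [show ((g.length + 1 : Nat) : Int) = 1 + (g.length : Int) from by push_cast; ring,
        show ((g.length : Int) + 1) = 1 + (g.length : Int) from by ring]
    · rw [if_neg hk, if_pos hk]
      simp only [List.flatMap_cons]
      rw [ih _ _ hrest]
      simp [numFrom]

-- ===== VERDICT (by name: the statement is the Claim_ definition above) =====
theorem add_priority_each_narrative_flow_spec : Claim_equal_add_priority_each_narrative_flow := by
  intro pbis _hdom hpre
  unfold Spec_add_priority_each_narrative_flow add_priority_each_narrative_flow add_priority_each_narrative_flow_alt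
  cases pbis with
  | nil => simp [splitRuns, goA]
  | cons d rest =>
    have hd := hpre d (List.mem_cons_self ..)
    have hrest : ∀ x ∈ rest, ((PySem.Dict.mk x).get? "narrative_flow_index").isSome = true :=
      fun x hm => hpre x (List.mem_cons_of_mem _ hm)
    obtain ⟨v, hv⟩ := Option.isSome_iff_exists.mp hd
    simp only [splitRuns, goA, pvGetKey, hv]
    rw [if_pos (by simp), main_inv rest (some v) [d] hrest]
    simp [numFrom]
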